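-- pv_equiv track=rewrite | github.com/sunray0620/wordle | wordle/main.py | calculate_elimination
-- ===== SOURCE A (Python) =====
-- WORD_LEN = 5
--
-- def check(real, guess):
--     result = ['X'] * WORD_LEN
--     real_ct = {}
--     for i in range(WORD_LEN):
--         if real[i] == guess[i]:
--             result[i] = 'G'
--         else:
--             real_ct[real[i]] = real_ct.get(real[i], 0) + 1
--
--     for i in range(WORD_LEN):
--         if result[i] != 'X':
--             continue
--         if real_ct.get(guess[i], 0) > 0:
--             result[i] = 'Y'
--             real_ct[guess[i]] -= 1
--         else:
--             result[i] = 'B'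
--     return ''.join(result)
--
-- def calculate_elimination(guess, candidates):
--     results_ct = {}
--     results = {}
--     max_ct = 0
--     for candidate in candidates:
--         check_result = check(candidate, guess)
--         results_ct[check_result] = results_ct.get(check_result, 0) + 1
--         if not results.get(check_result):
--             results[check_result] = []
--         results[check_result].append(candidate)
--         max_ct = max(max_ct, results_ct[check_result])
--     return max_ct, results
-- ===== SOURCE B (Python) =====
-- WORD_LEN = 5
--
-- def check(real, guess):
--     result = ['X'] * WORD_LEN
--     real_ct = {}
--     for i in range(WORD_LEN):
--         if real[i] == guess[i]:
--             result[i] = 'G'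
--         else:
--             real_ct[real[i]] = real_ct.get(real[i], 0) + 1
--
--     for i in range(WORD_LEN):
--         if result[i] != 'X':
--             continue
--         if real_ct.get(guess[i], 0) > 0:
--             result[i] = 'Y'
--             real_ct[guess[i]] -= 1
--         else:
--             result[i] = 'B'
--     return ''.join(result)
--
-- def calculate_elimination(guess, candidates):
--     patterns = [check(candidate, guess) for candidate in candidates]
--     order = list(dict.fromkeys(patterns))
--     results = {p: [c for q, c in zip(patterns, candidates) if q == p] for p in order}
--     max_ct = max((len(v) for v in results.values()), default=0)
--     return max_ct, results
-- ===== Notes on version B (the rewrite author's own statement) =====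
-- stated objective: alternative
-- what changed: A's single pass maintaining two hash dicts (per-pattern counter, per-pattern bucket) and a running max is replaced by: map candidates to patterns, dedup the patterns for first-occurrence key order, build each bucket with a filter pass over the (pattern, candidate) pairs, and take the max bucket size at the end (with default 0 for empty input).
import Mathlib
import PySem

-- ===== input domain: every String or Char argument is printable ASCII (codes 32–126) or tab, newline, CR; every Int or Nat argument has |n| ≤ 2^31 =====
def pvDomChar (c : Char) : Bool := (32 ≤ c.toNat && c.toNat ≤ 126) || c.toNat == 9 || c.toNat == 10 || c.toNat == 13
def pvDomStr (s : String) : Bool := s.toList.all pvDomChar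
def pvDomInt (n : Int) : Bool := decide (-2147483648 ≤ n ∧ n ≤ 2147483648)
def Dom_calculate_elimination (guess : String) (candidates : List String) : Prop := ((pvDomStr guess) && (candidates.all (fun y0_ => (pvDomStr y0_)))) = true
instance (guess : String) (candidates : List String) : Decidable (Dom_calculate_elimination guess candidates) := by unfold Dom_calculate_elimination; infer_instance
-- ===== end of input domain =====

-- B replaces A's one-pass hash grouping (two dicts + running max) by: map to patterns, dedup for
-- first-occurrence key order, one filter pass per key, and a final max over bucket sizes ('alternative', not faster).

-- ===== PORT A =====
-- helper `check` (identical in Source A and Source B, so shared by both ports); string indexing real[i] / guess[i]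
-- is pyGetD with a dummy default — exact because Pre_ keeps every indexed word at length ≥ 5.
def checkW (real guess : String) : String :=
  let r := real.toList
  let g := guess.toList
  -- result = ['X'] * WORD_LEN; real_ct = {}; first for-loop
  let s1 : List Char × PySem.Dict Char Int :=
    (PySem.List.pyRange 0 5 1).foldl (fun st i =>
      if PySem.List.pyGetD r i ' ' = PySem.List.pyGetD g i ' ' then
        (PySem.List.pySetD st.1 i 'G', st.2)
      else
        (st.1, st.2.insert (PySem.List.pyGetD r i ' ')
                 (st.2.getD (PySem.List.pyGetD r i ' ') 0 + 1)))
      (PySem.List.pyRepeat ['X'] 5, PySem.Dict.empty)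
  -- second for-loop
  let s2 : List Char × PySem.Dict Char Int :=
    (PySem.List.pyRange 0 5 1).foldl (fun st i =>
      if PySem.List.pyGetD st.1 i ' ' ≠ 'X' then st
      else if st.2.getD (PySem.List.pyGetD g i ' ') 0 > 0 then
        (PySem.List.pySetD st.1 i 'Y',
         st.2.insert (PySem.List.pyGetD g i ' ') (st.2.getD (PySem.List.pyGetD g i ' ') 0 - 1))
      else (PySem.List.pySetD st.1 i 'B', st.2)) s1
  -- ''.join(result) over one-character strings
  PySem.Str.join "" (s2.1.map (fun c => String.ofList [c]))

-- Python truthiness of results.get(cr): falsy iff None or []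
def pyTruthyList : Option (List String) → Bool
  | some (_ :: _) => true
  | _ => false

-- loop body of A's for-loop (f = fun candidate => check(candidate, guess));
-- results[cr].append(c) is modify with default [] (the key is always present at that point)
def stepA (f : String → String)
    (st : PySem.Dict String Int × PySem.Dict String (List String) × Int)
    (candidate : String) : PySem.Dict String Int × PySem.Dict String (List String) × Int :=
  let check_result := f candidate
  let results_ct := st.1.insert check_result (st.1.getD check_result 0 + 1)
  let results := (if pyTruthyList (st.2.1.get? check_result) then st.2.1
                  else st.2.1.insert check_result [])
  let results := results.modify check_result [] (fun l => l ++ [candidate])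
  (results_ct, results, max st.2.2 (results_ct.getD check_result 0))

def calculate_elimination (guess : String) (candidates : List String) :
    Int × (List (String × List String)) :=
  let st := candidates.foldl (stepA (fun candidate => checkW candidate guess))
              (PySem.Dict.empty, PySem.Dict.empty, 0)
  (st.2.2, st.2.1.items)

-- ===== PORT B =====
def calculate_elimination_alt (guess : String) (candidates : List String) :
    Int × (List (String × List String)) :=
  let patterns := candidates.map (fun candidate => checkW candidate guess)
  let order := PySem.List.dedup patterns                       -- list(dict.fromkeys(patterns))
  let results := order.map (fun p =>
    (p, ((patterns.zip candidates).filter (fun qc => qc.1 == p)).map (fun qc => qc.2)))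
  let max_ct := (PySem.List.max? (results.map (fun pv => (pv.2.length : Int))) (fun n => n)).getD 0
  (max_ct, results)

-- ===== PRECONDITION & SPEC =====
-- Pre_ excludes exactly the inputs where A raises IndexError: check() indexes the first 5
-- characters of the guess and of every candidate (no word is indexed when candidates = []).
def Pre_calculate_elimination (guess : String) (candidates : List String) : Prop :=
  candidates = [] ∨ (5 ≤ guess.toList.length ∧ ∀ c ∈ candidates, 5 ≤ c.toList.length)
instance (guess : String) (candidates : List String) : Decidable (Pre_calculate_elimination guess candidates) := by unfold Pre_calculate_elimination; infer_instance

def pvWitness_calculate_elimination : String × List String := ("crane", ["slate", "crane", "slurp"])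

def Spec_calculate_elimination (guess : String) (candidates : List String) (out : Int × (List (String × List String))) : Prop := out = calculate_elimination_alt guess candidates
instance (guess : String) (candidates : List String) (out : Int × (List (String × List String))) : Decidable (Spec_calculate_elimination guess candidates out) := by unfold Spec_calculate_elimination; infer_instance

-- ===== CLAIM (what is proved, stated in full; the proofs are below) =====
def Claim_equal_calculate_elimination : Prop := ∀ (guess : String) (candidates : List String), Dom_calculate_elimination guess candidates → Pre_calculate_elimination guess candidates → Spec_calculate_elimination guess candidates (calculate_elimination guess candidates)

-- ===== LEMMAS AND PROOFS =====

def gBuckets (f : String → String) (cs : List String) : List (String × List String) :=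
  (PySem.Set.ofList (cs.map f)).map (fun p => (p, cs.filter (fun c => f c == p)))
def ctList (f : String → String) (cs : List String) : List (String × Int) :=
  (PySem.Set.ofList (cs.map f)).map (fun p => (p, ((cs.map f).count p : Int)))

theorem get?_keyed {τ : Type} (v : String → τ) (S : List String) (q : String) :
    (PySem.Dict.mk (S.map (fun p => (p, v p)))).get? q = if q ∈ S then some (v q) else none := by
  induction S with
  | nil => simp [PySem.Dict.get?]
  | cons k rest ih =>
    rw [List.map_cons, PySem.Dict.get?_mk_cons, ih]
    by_cases h : k = q
    · subst h; simp
    · simp [h, Ne.symm h, beq_iff_eq]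

theorem contains_keyed {τ : Type} (v : String → τ) (S : List String) (q : String) :
    (PySem.Dict.mk (S.map (fun p => (p, v p)))).contains q = decide (q ∈ S) := by
  rw [PySem.Dict.contains_eq_isSome_get?, get?_keyed]
  by_cases h : q ∈ S <;> simp [h]

theorem insert_keyed_mem {τ : Type} (v : String → τ) (S : List String) (q : String) (w : τ)
    (h : q ∈ S) :
    (PySem.Dict.mk (S.map (fun p => (p, v p)))).insert q w
      = PySem.Dict.mk (S.map (fun p => (p, if p = q then w else v p))) := by
  have hc : (PySem.Dict.mk (S.map (fun p => (p, v p)))).contains q = true := by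
    rw [contains_keyed]; simpa using h
  simp only [PySem.Dict.insert, hc, if_true, List.map_map]
  congr 1
  apply List.map_congr_left
  intro p _
  by_cases hp : p = q
  · subst hp; simp
  · simp [Function.comp, hp, beq_iff_eq]

theorem insert_keyed_not_mem {τ : Type} (v : String → τ) (S : List String) (q : String) (w : τ)
    (h : q ∉ S) :
    (PySem.Dict.mk (S.map (fun p => (p, v p)))).insert q w
      = PySem.Dict.mk (S.map (fun p => (p, v p)) ++ [(q, w)]) := by
  have hc : (PySem.Dict.mk (S.map (fun p => (p, v p)))).contains q = false := by
    rw [contains_keyed]; simpa using h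
  simp [PySem.Dict.insert, hc]

theorem count_zero_singleton (q p : String) (h : p ≠ q) : List.count p [q] = 0 := by
  simp [List.count_eq_zero, h]

theorem filter_nil_of_not_mem (f : String → String) (t : List String) (p : String)
    (h : p ∉ t.map f) : t.filter (fun c => f c == p) = [] := by
  rw [List.filter_eq_nil_iff]
  intro c hc hb
  exact h (List.mem_map.2 ⟨c, hc, by simpa using hb⟩)

theorem filter_ne_nil_of_mem (f : String → String) (t : List String) (p : String)
    (h : p ∈ t.map f) : t.filter (fun c => f c == p) ≠ [] := by
  obtain ⟨c, hc, rfl⟩ := List.mem_map.1 h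
  intro hnil
  rw [List.filter_eq_nil_iff] at hnil
  exact hnil c hc (by simp)

theorem ct_getD (f : String → String) (t : List String) (q : String) :
    (PySem.Dict.mk (ctList f t)).getD q 0 = ((t.map f).count q : Int) := by
  unfold ctList
  rw [PySem.Dict.getD_eq_get?_getD, get?_keyed]
  by_cases h : q ∈ PySem.Set.ofList (t.map f)
  · simp [h]
  · have : q ∉ t.map f := fun hm => h ((PySem.Set.mem_ofList _ _).2 hm)
    simp [h, List.count_eq_zero_of_not_mem this]

theorem ct_step (f : String → String) (t : List String) (c : String) :
    (PySem.Dict.mk (ctList f t)).insert (f c) ((PySem.Dict.mk (ctList f t)).getD (f c) 0 + 1)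
      = PySem.Dict.mk (ctList f (t ++ [c])) := by
  rw [ct_getD]
  by_cases h : f c ∈ t.map f
  · have hS : f c ∈ PySem.Set.ofList (t.map f) := (PySem.Set.mem_ofList _ _).2 h
    rw [show ctList f t = (PySem.Set.ofList (t.map f)).map (fun p => (p, ((t.map f).count p : Int))) from rfl,
        insert_keyed_mem _ _ _ _ hS]
    unfold ctList
    simp only [List.map_append, List.map_singleton, PySem.Set.ofList_append_singleton,
      PySem.Set.add_of_mem hS]
    congr 1
    apply List.map_congr_left
    intro p hp
    by_cases hpc : p = f c
    · subst hpc; simp [List.count_append]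
    · simp [hpc, List.count_append, count_zero_singleton _ _ hpc]
  · have hS : f c ∉ PySem.Set.ofList (t.map f) := fun hm => h ((PySem.Set.mem_ofList _ _).1 hm)
    rw [show ctList f t = (PySem.Set.ofList (t.map f)).map (fun p => (p, ((t.map f).count p : Int))) from rfl,
        insert_keyed_not_mem _ _ _ _ hS]
    unfold ctList
    simp only [List.map_append, List.map_singleton, PySem.Set.ofList_append_singleton,
      PySem.Set.add_of_not_mem hS]
    congr 1
    congr 1
    · apply List.map_congr_left
      intro p hp
      have hpc : p ≠ f c := fun he => hS (he ▸ hp)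
      simp [List.count_append, count_zero_singleton _ _ hpc]
    · simp [List.count_append, List.count_eq_zero_of_not_mem h]

theorem res_step (f : String → String) (t : List String) (c : String) :
    ((if pyTruthyList ((PySem.Dict.mk (gBuckets f t)).get? (f c)) then PySem.Dict.mk (gBuckets f t)
      else (PySem.Dict.mk (gBuckets f t)).insert (f c) []).modify (f c) [] (fun l => l ++ [c]))
      = PySem.Dict.mk (gBuckets f (t ++ [c])) := by
  have hfc : (f c == f c) = true := by simp
  by_cases h : f c ∈ t.map f
  · have hS : f c ∈ PySem.Set.ofList (t.map f) := (PySem.Set.mem_ofList _ _).2 h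
    have hget : (PySem.Dict.mk (gBuckets f t)).get? (f c) = some (t.filter (fun c' => f c' == f c)) := by
      unfold gBuckets; rw [get?_keyed]; simp [hS]
    have htr : pyTruthyList ((PySem.Dict.mk (gBuckets f t)).get? (f c)) = true := by
      rw [hget]
      cases hb : t.filter (fun c' => f c' == f c) with
      | nil => exact absurd hb (filter_ne_nil_of_mem f t (f c) h)
      | cons x xs => rfl
    rw [if_pos htr, PySem.Dict.modify, PySem.Dict.getD_eq_get?_getD, hget]
    simp only [Option.getD_some]
    rw [show gBuckets f t = (PySem.Set.ofList (t.map f)).map (fun p => (p, t.filter (fun c' => f c' == p))) from rfl,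
        insert_keyed_mem _ _ _ _ hS]
    unfold gBuckets
    simp only [List.map_append, List.map_singleton, PySem.Set.ofList_append_singleton,
      PySem.Set.add_of_mem hS]
    congr 1
    apply List.map_congr_left
    intro p hp
    by_cases hpc : p = f c
    · subst hpc; simp [List.filter_append]
    · have : (f c == p) = false := by simpa [beq_iff_eq] using fun he => hpc he.symm
      simp [List.filter_append, this, hpc]
  · have hS : f c ∉ PySem.Set.ofList (t.map f) := fun hm => h ((PySem.Set.mem_ofList _ _).1 hm)
    have hget : (PySem.Dict.mk (gBuckets f t)).get? (f c) = none := by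
      unfold gBuckets; rw [get?_keyed]; simp [hS]
    rw [hget, if_neg (by simp [pyTruthyList])]
    rw [show gBuckets f t = (PySem.Set.ofList (t.map f)).map (fun p => (p, t.filter (fun c' => f c' == p))) from rfl,
        insert_keyed_not_mem _ _ _ _ hS]
    have hkey : (PySem.Set.ofList (t.map f)).map (fun p => (p, t.filter (fun c' => f c' == p))) ++ [(f c, [])]
        = (PySem.Set.ofList (t.map f) ++ [f c]).map
            (fun p => (p, if p = f c then [] else t.filter (fun c' => f c' == p))) := by
      rw [List.map_append, List.map_singleton]
      congr 1
      · apply List.map_congr_left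
        intro p hp
        have hpc : p ≠ f c := fun he => hS (he ▸ hp)
        simp [hpc]
      · simp
    have hmem : f c ∈ PySem.Set.ofList (t.map f) ++ [f c] := by simp
    have hw : (PySem.Dict.mk ((PySem.Set.ofList (t.map f) ++ [f c]).map
        (fun p => (p, if p = f c then [] else t.filter (fun c' => f c' == p))))).getD (f c) [] = [] := by
      rw [PySem.Dict.getD_eq_get?_getD, get?_keyed]
      simp [hmem]
    rw [hkey, PySem.Dict.modify, hw, List.nil_append, insert_keyed_mem _ _ _ _ hmem]
    unfold gBuckets
    simp only [List.map_append, List.map_singleton, PySem.Set.ofList_append_singleton,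
      PySem.Set.add_of_not_mem hS]
    congr 1
    congr 1
    · apply List.map_congr_left
      intro p hp
      have hpc : p ≠ f c := fun he => hS (he ▸ hp)
      have hfp : (f c == p) = false := by simpa [beq_iff_eq] using fun he => hpc he.symm
      simp [hpc, List.filter_append, hfp]
    · simp [List.filter_append, filter_nil_of_not_mem f t (f c) h]

def maxBkt (f : String → String) (cs : List String) : Int :=
  ((gBuckets f cs).map (fun pv => (pv.2.length : Int))).foldl max 0

theorem foldl_max_pull (l : List Int) (b y : Int) :
    l.foldl max (max b y) = max (l.foldl max b) y := by
  induction l generalizing b with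
  | nil => rfl
  | cons z t ih =>
    simp only [List.foldl_cons]
    rw [show max (max b y) z = max (max b z) y by omega, ih]

theorem foldl_max_bump (u v : List Int) (a x : Int) :
    (u ++ (x+1) :: v).foldl max a = max ((u ++ x :: v).foldl max a) (x+1) := by
  rw [List.foldl_append, List.foldl_append, List.foldl_cons, List.foldl_cons,
      foldl_max_pull, foldl_max_pull]
  omega

theorem len_filter_count (f : String → String) (cs : List String) (p : String) :
    ((cs.filter (fun c => f c == p)).length : Int) = (cs.map f).count p := by
  rw [List.count_eq_countP, ← List.countP_eq_length_filter, List.countP_map]; rfl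

theorem maxBkt_append (f : String → String) (t : List String) (c : String) :
    maxBkt f (t ++ [c]) = max (maxBkt f t) (((t.map f).count (f c) : Int) + 1) := by
  unfold maxBkt gBuckets
  have hlens : ∀ (S : List String) (cs : List String),
      ((S.map (fun p => (p, cs.filter (fun c' => f c' == p)))).map (fun pv => (pv.2.length : Int)))
        = S.map (fun p => ((cs.map f).count p : Int)) := by
    intro S cs
    rw [List.map_map]
    apply List.map_congr_left
    intro p _
    simp [Function.comp, len_filter_count]
  rw [hlens, hlens]
  simp only [List.map_append, List.map_singleton]
  by_cases h : f c ∈ t.map f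
  · have hS : PySem.Set.ofList (t.map f ++ [f c]) = PySem.Set.ofList (t.map f) := by
      rw [PySem.Set.ofList_append_singleton, PySem.Set.add_of_mem (by simpa [PySem.Set.mem_ofList] using h)]
    rw [hS]
    have hmem : f c ∈ PySem.Set.ofList (t.map f) := by simpa [PySem.Set.mem_ofList] using h
    obtain ⟨u, v, huv⟩ := List.append_of_mem hmem
    have hnd := PySem.Set.nodup_ofList (xs := t.map f)
    rw [huv] at hnd
    have hu : f c ∉ u := by
      intro hx; exact (List.disjoint_of_nodup_append hnd) hx List.mem_cons_self
    have hv : f c ∉ v := by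
      have := (List.nodup_append.1 hnd).2.1
      exact (List.nodup_cons.1 this).1
    rw [huv, List.map_append, List.map_append, List.map_cons, List.map_cons]
    have hcu : u.map (fun p => (((t.map f ++ [f c]).count p : Int))) = u.map (fun p => (((t.map f).count p : Int))) := by
      apply List.map_congr_left; intro p hp
      have hne : p ≠ f c := fun he => hu (he ▸ hp)
      simp [List.count_append, count_zero_singleton _ _ hne]
    have hcv : v.map (fun p => (((t.map f ++ [f c]).count p : Int))) = v.map (fun p => (((t.map f).count p : Int))) := by
      apply List.map_congr_left; intro p hp
      have hne : p ≠ f c := fun he => hv (he ▸ hp)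
      simp [List.count_append, count_zero_singleton _ _ hne]
    rw [hcu, hcv]
    have hcc : (((t.map f ++ [f c]).count (f c) : Int)) = ((t.map f).count (f c) : Int) + 1 := by
      simp [List.count_append]
    rw [hcc]
    exact foldl_max_bump _ _ _ _
  · have hS : PySem.Set.ofList (t.map f ++ [f c]) = PySem.Set.ofList (t.map f) ++ [f c] := by
      rw [PySem.Set.ofList_append_singleton, PySem.Set.add_of_not_mem (by simpa [PySem.Set.mem_ofList] using h)]
    rw [hS, List.map_append]
    have hmaps : (PySem.Set.ofList (t.map f)).map (fun p => (((t.map f ++ [f c]).count p : Int)))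
        = (PySem.Set.ofList (t.map f)).map (fun p => (((t.map f).count p : Int))) := by
      apply List.map_congr_left; intro p hp
      have hne : p ≠ f c := fun he => h (he ▸ ((PySem.Set.mem_ofList _ _).1 hp))
      simp [List.count_append, count_zero_singleton _ _ hne]
    rw [hmaps, List.foldl_append]
    have : ((t.map f).count (f c) : Int) = 0 := by
      simp [List.count_eq_zero_of_not_mem h]
    simp [List.count_append, this]

theorem foldA_eq (f : String → String) (cs : List String) :
    cs.foldl (stepA f) (PySem.Dict.empty, PySem.Dict.empty, 0) =
      (PySem.Dict.mk (ctList f cs), PySem.Dict.mk (gBuckets f cs), maxBkt f cs) := by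
  induction cs using List.reverseRecOn with
  | nil => rfl
  | append_singleton t c ih =>
    rw [List.foldl_append, ih, List.foldl_cons, List.foldl_nil]
    simp only [stepA]
    rw [ct_step, res_step, ct_getD]
    have hc : (((t ++ [c]).map f).count (f c) : Int) = ((t.map f).count (f c) : Int) + 1 := by
      simp [List.count_append]
    rw [hc, ← maxBkt_append]

theorem zipfilter (f : String → String) (cs : List String) (p : String) :
    (((cs.map f).zip cs).filter (fun qc => qc.1 == p)).map (fun qc => qc.2)
      = cs.filter (fun c => f c == p) := by
  induction cs with
  | nil => rfl
  | cons c t ih =>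
    simp only [List.map_cons, List.zip_cons_cons, List.filter_cons]
    by_cases h : f c == p <;> simp [h, ih]

theorem maxD_eq_foldl (l : List Int) (h : ∀ x ∈ l, 0 ≤ x) :
    (PySem.List.max? l (fun n => n)).getD 0 = l.foldl max 0 := by
  cases l with
  | nil => rfl
  | cons x t =>
    rw [PySem.List.max?_id_cons]
    simp only [Option.getD_some, List.foldl_cons]
    rw [max_eq_right (h x (by simp))]

theorem alt_eq (guess : String) (cs : List String) :
    calculate_elimination_alt guess cs =
      (maxBkt (fun c => checkW c guess) cs, gBuckets (fun c => checkW c guess) cs) := by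
  simp only [calculate_elimination_alt]
  have hres : (PySem.List.dedup (cs.map (fun c => checkW c guess))).map
      (fun p => (p, (((cs.map (fun c => checkW c guess)).zip cs).filter (fun qc => qc.1 == p)).map (fun qc => qc.2)))
      = gBuckets (fun c => checkW c guess) cs := by
    rw [PySem.List.dedup_eq_ofList]
    apply List.map_congr_left
    intro p _
    rw [zipfilter]
  rw [hres]
  have hnn : ∀ x ∈ (gBuckets (fun c => checkW c guess) cs).map (fun pv => (pv.2.length : Int)), (0:Int) ≤ x := by
    intro x hx
    obtain ⟨pv, _, rfl⟩ := List.mem_map.1 hx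
    positivity
  rw [maxD_eq_foldl _ hnn]
  rfl

-- ===== VERDICT (by name: the statement is the Claim_ definition above) =====
theorem calculate_elimination_spec : Claim_equal_calculate_elimination := by
  intro guess candidates _ _
  unfold Spec_calculate_elimination calculate_elimination
  rw [foldA_eq, alt_eq]
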